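-- pv_equiv track=rewrite | github.com/PrinceRaj354/BT_Group_Bootcamp | challenges/challenge_20_increment_series/increment_series.py | generate_increment_series
-- ===== SOURCE A (Python) =====
-- def generate_increment_series(n: int):
--     if n <= 0:
--         raise ValueError("N must be a positive integer")
--
--     result = [1]
--     increment = 1
--
--     while True:
--         next_value = result[-1] + increment
--         if next_value > n:
--             break
--         result.append(next_value)
--         increment += 1
--
--     return result
-- ===== SOURCE B (Python) =====
-- def generate_increment_series(n: int):
--     if n <= 0:
--         raise ValueError("N must be a positive integer")
--     # k-th term is 1 + k*(k+1)//2; binary-search the largest valid index k.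
--     m = 2 * (n - 1)
--     lo, hi = 0, n
--     while lo < hi:
--         mid = (lo + hi + 1) // 2
--         if mid * (mid + 1) <= m:
--             lo = mid
--         else:
--             hi = mid - 1
--     return [1 + i * (i + 1) // 2 for i in range(lo + 1)]
-- ===== Notes on version B (the rewrite author's own statement) =====
-- stated objective: alternative
-- what changed: Replaced the stateful while-loop that grows the list by an increasing increment with a closed-form term formula 1 + k*(k+1)//2, binary-searching the largest valid index and building the list by independent per-index evaluation.
import Mathlib
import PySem

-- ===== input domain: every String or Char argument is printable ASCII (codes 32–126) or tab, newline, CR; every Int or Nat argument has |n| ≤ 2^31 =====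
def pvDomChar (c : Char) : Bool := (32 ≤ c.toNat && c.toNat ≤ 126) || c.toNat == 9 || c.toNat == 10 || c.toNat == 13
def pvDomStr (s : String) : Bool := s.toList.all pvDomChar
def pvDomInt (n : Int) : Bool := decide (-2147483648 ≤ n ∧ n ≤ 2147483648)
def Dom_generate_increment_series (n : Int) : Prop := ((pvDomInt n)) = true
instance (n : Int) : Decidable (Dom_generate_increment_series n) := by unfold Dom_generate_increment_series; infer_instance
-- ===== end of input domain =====

-- B replaces A's stateful append loop by the closed-form term 1 + k*(k+1)//2 with a
-- binary search for the largest index; equivalence of RETURN values is proved for n ≥ 1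
-- (A raises ValueError for n ≤ 0, excluded by Pre_).

-- ===== PORT A =====
-- while True: next = result[-1] + increment; break if next > n; append; increment += 1
-- fuel n.toNat + 1 bounds the number of iterations (each append raises the last term by ≥ 1).
def pvLoopA (n : Int) : Nat → List Int → Int → List Int
  | 0, result, _ => result
  | fuel + 1, result, inc =>
    match PySem.List.pyGet? result (-1) with
    | none => result   -- unreachable: result is never empty
    | some last =>
      if last + inc > n then result
      else pvLoopA n fuel (result ++ [last + inc]) (inc + 1)

def generate_increment_series (n : Int) : List Int :=
  if n ≤ 0 then [] else pvLoopA n (n.toNat + 1) [1] 1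

-- ===== PORT B =====
-- binary search: largest k ≥ 0 with k*(k+1) ≤ m; fuel n.toNat + 1 ≥ initial gap hi - lo.
def pvBsearchB (m : Int) : Nat → Int → Int → Int
  | 0, lo, _ => lo
  | fuel + 1, lo, hi =>
    if lo < hi then
      let mid := PySem.Int.floordiv (lo + hi + 1) 2
      if mid * (mid + 1) ≤ m then pvBsearchB m fuel mid hi
      else pvBsearchB m fuel lo (mid - 1)
    else lo

def generate_increment_series_alt (n : Int) : List Int :=
  if n ≤ 0 then [] else
    let m := 2 * (n - 1)
    let lo := pvBsearchB m (n.toNat + 1) 0 n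
    (PySem.List.pyRange 0 (lo + 1) 1).map (fun i => 1 + PySem.Int.floordiv (i * (i + 1)) 2)

-- ===== PRECONDITION & SPEC =====
-- A raises ValueError exactly when n ≤ 0.
def Pre_generate_increment_series (n : Int) : Prop := 0 < n
instance (n : Int) : Decidable (Pre_generate_increment_series n) := by unfold Pre_generate_increment_series; infer_instance
def pvWitness_generate_increment_series : Int := (5)

def Spec_generate_increment_series (n : Int) (out : List Int) : Prop := out = generate_increment_series_alt n
instance (n : Int) (out : List Int) : Decidable (Spec_generate_increment_series n out) := by unfold Spec_generate_increment_series; infer_instance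

-- ===== CLAIM (what is proved, stated in full; the proofs are below) =====
def Claim_equal_generate_increment_series : Prop := ∀ (n : Int), Dom_generate_increment_series n → Pre_generate_increment_series n → Spec_generate_increment_series n (generate_increment_series n)

-- ===== LEMMAS AND PROOFS =====

-- the k-th term of the series
def pvTri (k : Nat) : Int := 1 + ((k * (k + 1) / 2 : Nat) : Int)

theorem pvTri_succ (k : Nat) : pvTri (k + 1) = pvTri k + (k + 1) := by
  unfold pvTri
  have hx : (k + 1) * ((k + 1) + 1) = k * (k + 1) + 2 * (k + 1) := by ring
  obtain ⟨a, ha⟩ := Nat.even_mul_succ_self k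
  have hnat : (k + 1) * ((k + 1) + 1) / 2 = k * (k + 1) / 2 + (k + 1) := by omega
  rw [hnat]; push_cast; ring

theorem pvTri_zero : pvTri 0 = 1 := by decide

theorem pvTri_ge (k : Nat) : (k : Int) + 1 ≤ pvTri k := by
  induction k with
  | zero => decide
  | succ k ih => rw [pvTri_succ]; push_cast; push_cast at ih; omega

theorem pvTri_mono {a b : Nat} (h : a ≤ b) : pvTri a ≤ pvTri b := by
  induction b with
  | zero => interval_cases a; rfl
  | succ b ih =>
    rcases Nat.lt_or_ge a (b + 1) with h' | h'
    · have := ih (by omega)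
      rw [pvTri_succ]; omega
    · have : a = b + 1 := by omega
      rw [this]

-- tri k ≤ n ↔ k*(k+1) ≤ 2*(n-1)
theorem pvTri_le_iff (k : Nat) (n : Int) :
    pvTri k ≤ n ↔ (k : Int) * (k + 1) ≤ 2 * (n - 1) := by
  unfold pvTri
  obtain ⟨a, ha⟩ := Nat.even_mul_succ_self k
  have h2 : (k : Int) * ((k : Int) + 1) = (a : Int) + (a : Int) := by exact_mod_cast ha
  have h3 : k * (k + 1) / 2 = a := by omega
  rw [h3]
  omega

-- A's loop, from the invariant state, produces the full series up to the greatest valid K.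
theorem pvLoopA_spec (n : Int) (K : Nat) (hK : pvTri K ≤ n) (hK1 : n < pvTri (K + 1)) :
    ∀ (fuel k : Nat), k ≤ K → K - k < fuel →
      pvLoopA n fuel ((List.range (k + 1)).map pvTri) ((k : Int) + 1)
        = (List.range (K + 1)).map pvTri := by
  intro fuel
  induction fuel with
  | zero => intro k _ h; omega
  | succ fuel ih =>
    intro k hk hfuel
    have hne : (List.range (k + 1)).map pvTri ≠ [] := by simp
    have hlast : PySem.List.pyGet? ((List.range (k + 1)).map pvTri) (-1) = some (pvTri k) := by
      rw [List.range_succ]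
      simp [PySem.List.pyGet?_neg_one_append_singleton]
    rw [pvLoopA, hlast]
    dsimp only
    have hstep : pvTri k + ((k : Int) + 1) = pvTri (k + 1) := by
      rw [pvTri_succ]
    by_cases hbr : pvTri k + ((k : Int) + 1) > n
    · rw [if_pos hbr]
      -- branch taken: k must equal K
      have hkK : k = K := by
        rcases Nat.lt_or_ge k K with h | h
        · exfalso
          have := pvTri_mono (show k + 1 ≤ K by omega)
          rw [hstep] at hbr; omega
        · omega
      rw [hkK]
    · rw [if_neg hbr]
      have hkK : k < K := by
        rcases Nat.lt_or_ge k K with h | h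
        · exact h
        · exfalso
          have : k = K := by omega
          subst this
          rw [hstep] at hbr; omega
      have happ : (List.range (k + 1)).map pvTri ++ [pvTri k + ((k : Int) + 1)]
          = (List.range (k + 1 + 1)).map pvTri := by
        rw [hstep, List.range_succ (n := k + 1), List.map_append]; rfl
      rw [happ]
      have : ((k : Int) + 1) + 1 = ((k + 1 : Nat) : Int) + 1 := by push_cast; ring
      rw [this]
      exact ih (k + 1) (by omega) (by omega)

-- B's binary search returns a value r with 0 ≤ r, r*(r+1) ≤ m < (r+1)*(r+2).
theorem pvBsearchB_spec (m : Int) :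
    ∀ (fuel : Nat) (lo hi : Int), 0 ≤ lo → lo ≤ hi →
      lo * (lo + 1) ≤ m → (∀ j : Int, hi < j → m < j * (j + 1)) →
      (hi - lo).toNat < fuel →
      let r := pvBsearchB m fuel lo hi
      0 ≤ r ∧ r * (r + 1) ≤ m ∧ m < (r + 1) * (r + 2) := by
  intro fuel
  induction fuel with
  | zero => intro lo hi _ _ _ _ h; omega
  | succ fuel ih =>
    intro lo hi hlo hlohi hloP hhiP hfuel
    rw [pvBsearchB]
    by_cases hcmp : lo < hi
    · rw [if_pos hcmp]
      have hmid : lo < PySem.Int.floordiv (lo + hi + 1) 2 ∧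
          PySem.Int.floordiv (lo + hi + 1) 2 ≤ hi := by
        rw [PySem.Int.floordiv_eq_ediv_of_pos (by omega)]
        omega
      set mid := PySem.Int.floordiv (lo + hi + 1) 2 with hmiddef
      by_cases hm : mid * (mid + 1) ≤ m
      · rw [if_pos hm]
        exact ih mid hi (by omega) (by omega) hm hhiP (by omega)
      · rw [if_neg hm]
        refine ih lo (mid - 1) hlo (by omega) hloP ?_ (by omega)
        intro j hj
        rcases le_or_gt j mid with h | h
        · have : j = mid := by omega
          subst this; omega
        · have h1 : mid * (mid + 1) ≤ j * (j + 1) := by nlinarith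
          omega
    · rw [if_neg hcmp]
      have : lo = hi := by omega
      subst this
      refine ⟨hlo, hloP, ?_⟩
      have := hhiP (lo + 1) (by omega)
      nlinarith [this]

-- the per-index formula in B's comprehension equals pvTri
theorem pvFormula_eq_tri (k : Nat) :
    1 + PySem.Int.floordiv ((k : Int) * ((k : Int) + 1)) 2 = pvTri k := by
  obtain ⟨a, ha⟩ := Nat.even_mul_succ_self k
  have h2 : (k : Int) * ((k : Int) + 1) = (a : Int) + (a : Int) := by exact_mod_cast ha
  rw [h2, PySem.Int.floordiv_eq_ediv_of_pos (by omega)]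
  unfold pvTri
  have h3 : k * (k + 1) / 2 = a := by omega
  rw [h3]
  omega

-- uniqueness of the greatest valid index
theorem pvK_unique {a b : Nat} (n : Int)
    (ha1 : pvTri a ≤ n) (ha2 : n < pvTri (a + 1))
    (hb1 : pvTri b ≤ n) (hb2 : n < pvTri (b + 1)) : a = b := by
  rcases Nat.lt_or_ge a b with h | h
  · exfalso; have := pvTri_mono (show a + 1 ≤ b by omega); omega
  · rcases Nat.lt_or_ge b a with h' | h'
    · exfalso; have := pvTri_mono (show b + 1 ≤ a by omega); omega
    · omega

-- existence of the greatest valid index for 1 ≤ n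
theorem pvK_exists (n : Int) (hn : 0 < n) :
    ∃ K : Nat, pvTri K ≤ n ∧ n < pvTri (K + 1) := by
  classical
  have h0 : pvTri 0 ≤ n := by rw [pvTri_zero]; omega
  set K := Nat.findGreatest (fun k => pvTri k ≤ n) n.toNat with hKdef
  have hP : pvTri K ≤ n :=
    Nat.findGreatest_spec (P := fun k => pvTri k ≤ n) (Nat.zero_le _) h0
  refine ⟨K, hP, ?_⟩
  rcases Nat.lt_or_ge K n.toNat with h | h
  · have hng : ¬ pvTri (K + 1) ≤ n :=
      Nat.findGreatest_is_greatest (P := fun k => pvTri k ≤ n) (k := K + 1)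
        (n := n.toNat) (by omega) (by omega)
    omega
  · have := pvTri_ge (K + 1)
    push_cast at this
    omega

-- ===== VERDICT (by name: the statement is the Claim_ definition above) =====
theorem generate_increment_series_spec : Claim_equal_generate_increment_series := by
  intro n _ hpre
  unfold Spec_generate_increment_series
  have hn : 0 < n := hpre
  obtain ⟨K, hK1, hK2⟩ := pvK_exists n hn
  unfold generate_increment_series generate_increment_series_alt
  rw [if_neg (by omega), if_neg (by omega)]
  -- A's side
  have hA : pvLoopA n (n.toNat + 1) [1] 1 = (List.range (K + 1)).map pvTri := by
    have h0 : ([1] : List Int) = (List.range (0 + 1)).map pvTri := by decide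
    have h1 : (1 : Int) = ((0 : Nat) : Int) + 1 := by norm_num
    rw [h0, h1]
    refine pvLoopA_spec n K hK1 hK2 (n.toNat + 1) 0 ?_ ?_
    · -- K ≤ ? need 0 ≤ K trivially; wait arg order: k ≤ K
      omega
    · -- K - 0 < n.toNat + 1 : K ≤ n since pvTri K ≥ K + 1
      have := pvTri_ge K
      omega
  rw [hA]
  show List.map pvTri (List.range (K + 1)) =
    (PySem.List.pyRange 0 (pvBsearchB (2 * (n - 1)) (n.toNat + 1) 0 n + 1) 1).map
      (fun i => 1 + PySem.Int.floordiv (i * (i + 1)) 2)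
  -- B's side
  have hB := pvBsearchB_spec (2 * (n - 1)) (n.toNat + 1) 0 n (by omega) (by omega)
      (by omega) (by intro j hj; nlinarith) (by omega)
  set r := pvBsearchB (2 * (n - 1)) (n.toNat + 1) 0 n with hrdef
  obtain ⟨hr0, hr1, hr2⟩ := hB
  -- r.toNat satisfies the greatest-index characterization, hence equals K
  have hrK : r.toNat = K := by
    apply pvK_unique n
    · rw [pvTri_le_iff]
      push_cast [Int.toNat_of_nonneg hr0]
      omega
    · rw [← not_le, pvTri_le_iff]
      push_cast [Int.toNat_of_nonneg hr0]
      have hb : (r + 1) * (r + 1 + 1) = (r + 1) * (r + 2) := by ring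
      omega
    · exact hK1
    · exact hK2
  have hrval : r = (K : Int) := by omega
  rw [hrval]
  -- the comprehension over pyRange 0 (K+1) 1 is the map over List.range (K+1)
  have hrange : PySem.List.pyRange 0 ((K : Int) + 1) 1
      = (List.range (K + 1)).map (fun k : Nat => Int.ofNat k) := by
    rw [PySem.List.pyRange_one]
    have h1 : ((K : Int) + 1 - 0).toNat = K + 1 := by omega
    rw [h1]
    apply List.map_congr_left
    intro a _
    simp
  rw [hrange, List.map_map]
  apply List.map_congr_left
  intro k _
  simp only [Function.comp]
  exact (pvFormula_eq_tri k).symm
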